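-- pv_equiv track=rewrite | github.com/Essentialisms/property | scraper/parser.py | _balanced_json
-- ===== SOURCE A (Python) =====
-- def _balanced_json(text: str, start: int) -> str | None:
--     """Return the JSON object beginning at `start` (which must point at `{`)."""
--     if start < 0 or start >= len(text) or text[start] != "{":
--         return None
--     depth = 0
--     in_str = False
--     escape = False
--     for i in range(start, len(text)):
--         c = text[i]
--         if in_str:
--             if escape:
--                 escape = False
--             elif c == "\\":
--                 escape = True
--             elif c == '"':
--                 in_str = False
--             continue
--         if c == '"':
--             in_str = True
--         elif c == "{":
--             depth += 1
--         elif c == "}":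
--             depth -= 1
--             if depth == 0:
--                 return text[start:i + 1]
--     return None
-- ===== SOURCE B (Python) =====
-- def _balanced_json(text: str, start: int) -> str | None:
--     """Return the JSON object beginning at `start` (which must point at `{`)."""
--     if start < 0 or start >= len(text) or text[start] != "{":
--         return None
--     n = len(text)
--     depth = 0
--     i = start
--     while i < n:
--         c = text[i]
--         if c == "{":
--             depth += 1
--         elif c == "}":
--             depth -= 1
--             if depth == 0:
--                 return text[start:i + 1]
--         elif c == '"':
--             i += 1
--             while i < n:
--                 if text[i] == "\\":
--                     i += 2
--                 elif text[i] == '"':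
--                     break
--                 else:
--                     i += 1
--         i += 1
--     return None
-- ===== Notes on version B (the rewrite author's own statement) =====
-- stated objective: alternative
-- what changed: A's single for-loop with in_str/escape boolean flags is replaced by a manual-index outer while loop with depth only, whose string bodies are consumed by a nested inner while loop that skips two characters on a backslash; the flag state machine disappears.
import Mathlib
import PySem

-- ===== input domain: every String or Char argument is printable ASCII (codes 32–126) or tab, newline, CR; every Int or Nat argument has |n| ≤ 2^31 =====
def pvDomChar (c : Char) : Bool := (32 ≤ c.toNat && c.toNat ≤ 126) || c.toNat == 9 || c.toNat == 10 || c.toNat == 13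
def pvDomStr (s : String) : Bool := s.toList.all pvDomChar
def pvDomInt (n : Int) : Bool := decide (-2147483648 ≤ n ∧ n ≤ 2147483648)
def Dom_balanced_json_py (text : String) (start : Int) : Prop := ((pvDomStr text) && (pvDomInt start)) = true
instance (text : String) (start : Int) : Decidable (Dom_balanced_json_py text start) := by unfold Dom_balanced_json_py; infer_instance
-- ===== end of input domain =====

-- B replaces A's in_str/escape boolean state machine by a nested string-skipping loop
-- (manual index, inner loop consumes string bodies, skipping 2 chars on a backslash);
-- objective: alternative decomposition, same single linear pass.

-- ===== PORT A =====
-- A's for-loop: state (depth, in_str, escape), returns the absolute index of the closing '}'.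
def pvAGo : List Char → Nat → Int → Bool → Bool → Option Nat
  | [], _, _, _, _ => none
  | c :: rest, i, depth, in_str, escape =>
    if in_str then
      if escape then pvAGo rest (i + 1) depth in_str false
      else if c = '\\' then pvAGo rest (i + 1) depth in_str true
      else if c = '"' then pvAGo rest (i + 1) depth false escape
      else pvAGo rest (i + 1) depth in_str escape
    else
      if c = '"' then pvAGo rest (i + 1) depth true escape
      else if c = '{' then pvAGo rest (i + 1) (depth + 1) in_str escape
      else if c = '}' then
        if depth - 1 = 0 then some i
        else pvAGo rest (i + 1) (depth - 1) in_str escape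
      else pvAGo rest (i + 1) depth in_str escape

def balanced_json_py (text : String) (start : Int) : Option String :=
  let cs := text.toList
  if start < 0 ∨ (cs.length : Int) ≤ start ∨ PySem.List.pyGet? cs start ≠ some '{' then none
  else
    match pvAGo (cs.drop start.toNat) start.toNat 0 false false with
    | none => none
    | some i => some (PySem.Str.slice text (some start) (some ((i : Int) + 1)))

-- ===== PORT B =====
-- B's inner while: consume a string body; stops AT the closing quote (or at the end),
-- returning the remaining suffix together with its absolute index.
def pvBSkip : List Char → Nat → List Char × Nat
  | [], i => ([], i)
  | c :: rest, i =>
    if c = '\\' then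
      match rest with
      | [] => ([], i + 2)
      | _ :: r' => pvBSkip r' (i + 2)
    else if c = '"' then (c :: rest, i)
    else pvBSkip rest (i + 1)

theorem pvBSkip_len : ∀ (l : List Char) (i : Nat), (pvBSkip l i).1.length ≤ l.length := by
  intro l i
  induction l, i using pvBSkip.induct with
  | case1 i => simp [pvBSkip]
  | case2 i => simp [pvBSkip]
  | case3 i head r' ih => rw [pvBSkip.eq_def]; simp; omega
  | case4 rest i h => rw [pvBSkip.eq_def]; simp
  | case5 c rest i h h2 ih => rw [pvBSkip.eq_def]; simp only [if_neg h, if_neg h2, List.length_cons]; omega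

-- B's outer while loop: manual index, depth counter, inner call for string bodies.
def pvBGo : List Char → Nat → Int → Option Nat
  | [], _, _ => none
  | c :: rest, i, depth =>
    if c = '{' then pvBGo rest (i + 1) (depth + 1)
    else if c = '}' then
      if depth - 1 = 0 then some i else pvBGo rest (i + 1) (depth - 1)
    else if c = '"' then
      let p := pvBSkip rest (i + 1)
      pvBGo p.1.tail (p.2 + 1) depth
    else pvBGo rest (i + 1) depth
termination_by l _ _ => l.length
decreasing_by
  all_goals try (simp; done)
  have h := pvBSkip_len rest (i + 1)
  have h2 : (pvBSkip rest (i + 1)).1.tail.length ≤ (pvBSkip rest (i + 1)).1.length := by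
    cases (pvBSkip rest (i + 1)).1 <;> simp
  simp only [List.length_cons]; omega

def balanced_json_py_alt (text : String) (start : Int) : Option String :=
  let cs := text.toList
  if start < 0 ∨ (cs.length : Int) ≤ start ∨ PySem.List.pyGet? cs start ≠ some '{' then none
  else
    match pvBGo (cs.drop start.toNat) start.toNat 0 with
    | none => none
    | some i => some (PySem.Str.slice text (some start) (some ((i : Int) + 1)))

-- ===== PRECONDITION & SPEC =====
def Spec_balanced_json_py (text : String) (start : Int) (out : Option String) : Prop := out = balanced_json_py_alt text start
instance (text : String) (start : Int) (out : Option String) : Decidable (Spec_balanced_json_py text start out) := by unfold Spec_balanced_json_py; infer_instance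

-- ===== CLAIM (what is proved, stated in full; the proofs are below) =====
def Claim_equal_balanced_json_py : Prop := ∀ (text : String) (start : Int), Dom_balanced_json_py text start → Spec_balanced_json_py text start (balanced_json_py text start)

-- ===== LEMMAS AND PROOFS =====

-- A's in_str run equals B's inner skip loop: from a string body, both land on the
-- character after the closing quote (or exhaust the input).
theorem pvSkip_eq (l : List Char) (i : Nat) (depth : Int) :
    pvAGo l i depth true false =
      pvAGo (pvBSkip l i).1.tail ((pvBSkip l i).2 + 1) depth false false := by
  induction l, i using pvBSkip.induct with
  | case1 i => simp [pvBSkip, pvAGo]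
  | case2 i => rw [pvBSkip.eq_def, pvAGo.eq_def]; simp [pvAGo]
  | case3 i head r' ih =>
      rw [pvBSkip.eq_def, pvAGo.eq_def]
      simpa [pvAGo] using ih
  | case4 rest i h =>
      rw [pvBSkip.eq_def, pvAGo.eq_def]; simp
  | case5 c rest i h h2 ih =>
      rw [pvBSkip.eq_def, pvAGo.eq_def]
      simpa [h, h2] using ih

-- Outside a string, A's state machine equals B's outer loop.
theorem pvGo_eq (l : List Char) (i : Nat) (depth : Int) :
    pvAGo l i depth false false = pvBGo l i depth := by
  induction l, i, depth using pvBGo.induct with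
  | case1 i depth => simp [pvAGo, pvBGo]
  | case2 rest i depth ih =>
      rw [pvAGo.eq_def, pvBGo.eq_def]
      simpa using ih
  | case3 rest i depth hd h =>
      rw [pvAGo.eq_def, pvBGo.eq_def]
      simp [hd]
  | case4 rest i depth hd h ih =>
      rw [pvAGo.eq_def, pvBGo.eq_def]
      simpa [hd] using ih
  | case5 rest i depth p h h2 ih =>
      have hp : p = pvBSkip rest (i + 1) := rfl
      rw [pvAGo.eq_def, pvBGo.eq_def]
      simpa [h, h2, pvSkip_eq, ← hp] using ih
  | case6 c rest i depth h h2 h3 ih =>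
      rw [pvAGo.eq_def, pvBGo.eq_def]
      simpa [h, h2, h3] using ih

-- ===== VERDICT (by name: the statement is the Claim_ definition above) =====
theorem balanced_json_py_spec : Claim_equal_balanced_json_py := by
  intro text start _
  unfold Spec_balanced_json_py balanced_json_py balanced_json_py_alt
  simp only []
  split_ifs with h
  · rfl
  · rw [pvGo_eq]
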